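-- pv_equiv track=rewrite | github.com/f1r3k3rn/codeforces | contests/1006/D.py | solve
-- ===== SOURCE A (Python) =====
-- def solve(n, vet):
--
--     dp = [[0 for _ in range(n)] for _ in range(n)]
--
--     for i in range(n):
--
--         k = 0
--         for j in range(i + 1, n):
--             if vet[j] < vet[i]:
--                 k += 1
--             dp[i][i] = k
--
--         for j in range(i + 1, n):
--
--             if vet[j] < vet[i]:
--                 k -= 1
--             elif vet[j] > vet[i]:
--                 k += 1
--
--             dp[i][j] = k
--
--
--     sol = 0
--     rsol = 0
--
--     kk,jj = 0,0
--
--     for i in range(n):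
--         sol += dp[i][i]
--
--     rsol = sol
--
--     for i in range(n):
--         for j in range(i, n):
--
--             if rsol > sol - dp[i][i] + dp[i][j]:
--                 rsol = sol - dp[i][i]  + dp[i][j]
--                 kk,jj = i,j
--
--
--     return "{} {}".format(kk + 1, jj + 1)
-- ===== SOURCE B (Python) =====
-- def solve(n, vet):
--     best, kk, jj = 0, 0, 0
--     for i in range(n):
--         net = 0
--         for j in range(i + 1, n):
--             if vet[j] > vet[i]:
--                 net += 1
--             elif vet[j] < vet[i]:
--                 net -= 1
--             if net < best:
--                 best = net
--                 kk, jj = i, j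
--     return "{} {}".format(kk + 1, jj + 1)
-- ===== Notes on version B (the rewrite author's own statement) =====
-- stated objective: simpler
-- what changed: B drops the n-by-n dp table and the separate sol/rescan phases: one two-loop pass keeps a single running net counter per start index and records the best (net,i,j) directly, since the table and sol cancel out of the returned answer.
import Mathlib
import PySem

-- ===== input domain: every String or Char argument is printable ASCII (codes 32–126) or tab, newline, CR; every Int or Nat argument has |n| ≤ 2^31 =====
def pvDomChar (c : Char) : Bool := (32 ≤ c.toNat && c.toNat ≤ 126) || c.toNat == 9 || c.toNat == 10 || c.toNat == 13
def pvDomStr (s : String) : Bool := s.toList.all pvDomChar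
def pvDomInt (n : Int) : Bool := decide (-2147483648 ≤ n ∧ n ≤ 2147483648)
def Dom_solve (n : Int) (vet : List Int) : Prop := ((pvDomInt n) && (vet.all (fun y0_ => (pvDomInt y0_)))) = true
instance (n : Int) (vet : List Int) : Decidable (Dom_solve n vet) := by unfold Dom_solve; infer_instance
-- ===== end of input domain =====

-- B is simpler: it drops A's n×n dp table and the separate sol/rescan phases, keeping one
-- running net counter and the best (net,i,j) seen; the table and sol cancel out of the answer.

-- shared helper: vet[t] for a loop index t (always 0 ≤ t < n ≤ len vet under Pre_solve, so exact)
def pyAt (vet : List Int) (t : Int) : Int := PySem.List.pyGetD vet t 0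

-- ===== PORT A =====
-- dp[i][j] read/write: loop indices always satisfy 0 ≤ i,j < n = side of dp, so .toNat and
-- List.getD/List.set are exactly Python's dp[i][j] here
def getIJ (dp : List (List Int)) (i j : Int) : Int := (dp.getD i.toNat []).getD j.toNat 0

def setIJ (dp : List (List Int)) (i j : Int) (v : Int) : List (List Int) :=
  dp.set i.toNat ((dp.getD i.toNat []).set j.toNat v)

-- body of A's first inner loop (k counts vet[j] < vet[i]; dp[i][i] = k each iteration)
def step1 (vet : List Int) (i : Int) (p : Int × List (List Int)) (j : Int) : Int × List (List Int) :=
  let k := if pyAt vet j < pyAt vet i then p.1 + 1 else p.1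
  (k, setIJ p.2 i i k)

-- body of A's second inner loop (k -=/+= 1; dp[i][j] = k)
def step2 (vet : List Int) (i : Int) (p : Int × List (List Int)) (j : Int) : Int × List (List Int) :=
  let k := if pyAt vet j < pyAt vet i then p.1 - 1
           else if pyAt vet j > pyAt vet i then p.1 + 1 else p.1
  (k, setIJ p.2 i j k)

-- body of A's final selection loop over (rsol, kk, jj)
def stepA (dp : List (List Int)) (sol i : Int) (st : Int × Int × Int) (j : Int) : Int × Int × Int :=
  if st.1 > sol - getIJ dp i i + getIJ dp i j
  then (sol - getIJ dp i i + getIJ dp i j, i, j) else st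

def solve (n : Int) (vet : List Int) : String :=
  let rng := PySem.List.pyRange 0 n 1
  let dp0 : List (List Int) := rng.map (fun _ => rng.map (fun _ => (0 : Int)))
  let dp := rng.foldl (fun dp i =>
      ((PySem.List.pyRange (i + 1) n 1).foldl (step2 vet i)
        ((PySem.List.pyRange (i + 1) n 1).foldl (step1 vet i) (0, dp))).2) dp0
  let sol := rng.foldl (fun s i => s + getIJ dp i i) 0
  let r := rng.foldl (fun st i => (PySem.List.pyRange i n 1).foldl (stepA dp sol i) st) (sol, 0, 0)
  PySem.Int.toStr (r.2.1 + 1) ++ " " ++ PySem.Int.toStr (r.2.2 + 1)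

-- ===== PORT B =====
-- body of B's inner loop over (net, best, kk, jj)
def stepB (vet : List Int) (i : Int) (q : Int × Int × Int × Int) (j : Int) : Int × Int × Int × Int :=
  let net := if pyAt vet j > pyAt vet i then q.1 + 1
             else if pyAt vet j < pyAt vet i then q.1 - 1 else q.1
  if net < q.2.1 then (net, net, i, j) else (net, q.2)

def solve_alt (n : Int) (vet : List Int) : String :=
  let st := (PySem.List.pyRange 0 n 1).foldl
    (fun st i => ((PySem.List.pyRange (i + 1) n 1).foldl (stepB vet i) (0, st)).2)
    ((0 : Int), (0 : Int), (0 : Int))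
  PySem.Int.toStr (st.2.1 + 1) ++ " " ++ PySem.Int.toStr (st.2.2 + 1)

-- ===== PRECONDITION & SPEC =====
-- Pre_ excludes exactly the inputs where Python A raises IndexError (n ≥ 2 with fewer than n
-- elements in vet); A returns normally on every input admitted here.
def Pre_solve (n : Int) (vet : List Int) : Prop := n ≤ (vet.length : Int) ∨ n ≤ 1
instance (n : Int) (vet : List Int) : Decidable (Pre_solve n vet) := by unfold Pre_solve; infer_instance

def pvWitness_solve : Int × List Int := (3, [3, 1, 2])

def Spec_solve (n : Int) (vet : List Int) (out : String) : Prop := out = solve_alt n vet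
instance (n : Int) (vet : List Int) (out : String) : Decidable (Spec_solve n vet out) := by unfold Spec_solve; infer_instance

-- ===== CLAIM (what is proved, stated in full; the proofs are below) =====
def Claim_equal_solve : Prop := ∀ (n : Int) (vet : List Int), Dom_solve n vet → Pre_solve n vet → Spec_solve n vet (solve n vet)

-- ===== LEMMAS AND PROOFS =====

-- the ±1 step contributed by position j relative to position i
def sgn (vet : List Int) (i j : Int) : Int :=
  if pyAt vet j > pyAt vet i then 1 else if pyAt vet j < pyAt vet i then -1 else 0

-- running sum of sgn over j ∈ [i+1, b)
def S (vet : List Int) (i b : Int) : Int :=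
  ((PySem.List.pyRange (i + 1) b 1).map (sgn vet i)).sum

-- number of j ∈ (i, n) with vet[j] < vet[i]
def cnt (vet : List Int) (n i : Int) : Int :=
  ((PySem.List.pyRange (i + 1) n 1).countP (fun j => decide (pyAt vet j < pyAt vet i)) : Int)

-- final value of dp[r][c] in A
def Ent (vet : List Int) (n r c : Int) : Int :=
  if c < r then 0 else if c = r then cnt vet n r else cnt vet n r + S vet r (c + 1)

-- pure forms of the two selection-loop bodies
def pureA (s i : Int) (f : Int → Int) (st : Int × Int × Int) (j : Int) : Int × Int × Int :=
  if st.1 > s + f j then (s + f j, i, j) else st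

def pureB (i : Int) (f : Int → Int) (st : Int × Int × Int) (j : Int) : Int × Int × Int :=
  if f j < st.1 then (f j, i, j) else st

theorem S_succ (vet : List Int) (i b : Int) (h : i + 1 ≤ b) :
    S vet i (b + 1) = S vet i b + sgn vet i b := by
  unfold S
  rw [PySem.List.pyRange_one_succ_right h, List.map_append, List.sum_append]
  simp

theorem S_self (vet : List Int) (i : Int) : S vet i (i + 1) = 0 := by
  unfold S
  rw [PySem.List.pyRange_one_eq_nil (by omega)]
  simp

theorem getD_set {α : Type} (l : List α) (i j : Nat) (a : α) (d : α) :
    (l.set i a).getD j d = if i = j ∧ i < l.length then a else l.getD j d := by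
  rw [List.getD_eq_getElem?_getD, List.getElem?_set]
  by_cases h : i = j
  · subst h
    by_cases hl : i < l.length
    · simp [hl]
    · simp [hl, List.getD_eq_getElem?_getD]
  · simp [h, List.getD_eq_getElem?_getD]

theorem length_setIJ (dp : List (List Int)) (i j : Int) (v : Int) :
    (setIJ dp i j v).length = dp.length := by
  unfold setIJ; simp

theorem rowlen_setIJ (dp : List (List Int)) (i j : Int) (v : Int) (r : Nat) :
    ((setIJ dp i j v).getD r []).length = ((dp.getD r []).length) := by
  unfold setIJ
  rw [getD_set]
  by_cases h : i.toNat = r ∧ i.toNat < dp.length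
  · rw [if_pos h, List.length_set, h.1]
  · rw [if_neg h]

theorem getIJ_setIJ (dp : List (List Int)) (i j r c v : Int)
    (hi : i.toNat < dp.length) (hj : j.toNat < (dp.getD i.toNat []).length) :
    getIJ (setIJ dp i j v) r c =
      if r.toNat = i.toNat ∧ c.toNat = j.toNat then v else getIJ dp r c := by
  unfold getIJ setIJ
  rw [getD_set]
  by_cases h : i.toNat = r.toNat
  · rw [h] at hj ⊢
    rw [if_pos ⟨rfl, h ▸ hi⟩, getD_set]
    by_cases hc : j.toNat = c.toNat
    · rw [if_pos ⟨hc, hj⟩, if_pos ⟨rfl, hc.symm⟩]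
    · rw [if_neg (by omega), if_neg (by omega)]
  · rw [if_neg (by omega), if_neg (by omega)]

theorem setIJ_setIJ (dp : List (List Int)) (i j : Int) (v w : Int)
    (hi : i.toNat < dp.length) :
    setIJ (setIJ dp i j v) i j w = setIJ dp i j w := by
  unfold setIJ
  rw [getD_set, if_pos ⟨rfl, hi⟩, List.set_set, List.set_set]

theorem loop1_spec (vet : List Int) (i : Int) (L : List Int) :
    ∀ (k₀ : Int) (dp₀ : List (List Int)), i.toNat < dp₀.length →
    L.foldl (step1 vet i) (k₀, dp₀) =
      (k₀ + (L.countP (fun j => decide (pyAt vet j < pyAt vet i)) : Int),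
       if L = [] then dp₀
       else setIJ dp₀ i i (k₀ + (L.countP (fun j => decide (pyAt vet j < pyAt vet i)) : Int))) := by
  induction L with
  | nil => intro k₀ dp₀ _; simp
  | cons j t ih =>
    intro k₀ dp₀ hi
    rw [List.foldl_cons]
    rw [show step1 vet i (k₀, dp₀) j =
        ((if pyAt vet j < pyAt vet i then k₀ + 1 else k₀),
         setIJ dp₀ i i (if pyAt vet j < pyAt vet i then k₀ + 1 else k₀)) from rfl]
    rw [ih _ _ (by rw [length_setIJ]; exact hi)]
    have hk : (if pyAt vet j < pyAt vet i then k₀ + 1 else k₀)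
        + ((t.countP (fun j => decide (pyAt vet j < pyAt vet i)) : Nat) : Int)
        = k₀ + (((j :: t).countP (fun j => decide (pyAt vet j < pyAt vet i)) : Nat) : Int) := by
      by_cases hp : pyAt vet j < pyAt vet i
      · simp [hp]; ring
      · simp [hp]
    rw [hk]
    rcases eq_or_ne t ([] : List Int) with ht | ht
    · subst ht
      simp only [List.countP_nil, Nat.cast_zero, add_zero] at hk
      rw [hk]
      simp [List.countP_cons]
    · rw [if_neg ht, if_neg (show ¬(j :: t = []) by simp), setIJ_setIJ _ _ _ _ _ hi]


theorem step2_fst (vet : List Int) (i : Int) (p : Int × List (List Int)) (j : Int) :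
    (step2 vet i p j).1 = p.1 + sgn vet i j := by
  unfold step2 sgn
  dsimp only
  split_ifs <;> omega

theorem loop2_spec (vet : List Int) (n i k₁ : Int) (dp₁ : List (List Int))
    (h0i : 0 ≤ i) (hin : i < n) (hlen : dp₁.length = n.toNat)
    (hrowi : (dp₁.getD i.toNat []).length = n.toNat) :
    ∀ (t : Nat) (b : Int), b = i + 1 + t → b ≤ n →
    (((PySem.List.pyRange (i + 1) b 1).foldl (step2 vet i) (k₁, dp₁)).1 = k₁ + S vet i b) ∧
    (((PySem.List.pyRange (i + 1) b 1).foldl (step2 vet i) (k₁, dp₁)).2.length = n.toNat) ∧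
    (∀ r : Nat, ((((PySem.List.pyRange (i + 1) b 1).foldl (step2 vet i) (k₁, dp₁)).2.getD r []).length)
        = ((dp₁.getD r []).length)) ∧
    (∀ r c : Int, 0 ≤ r → 0 ≤ c →
      getIJ (((PySem.List.pyRange (i + 1) b 1).foldl (step2 vet i) (k₁, dp₁)).2) r c =
        if r = i ∧ i + 1 ≤ c ∧ c < b then k₁ + S vet i (c + 1) else getIJ dp₁ r c) := by
  intro t
  induction t with
  | zero =>
    intro b hb hbn
    have hb' : b = i + 1 := by push_cast at hb; omega
    subst hb'
    rw [PySem.List.pyRange_one_eq_nil (by omega)]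
    refine ⟨by simp [S_self], by simp [hlen], by simp, ?_⟩
    intro r c hr hc
    rw [if_neg (by omega)]
    simp
  | succ t ih =>
    intro b hb hbn
    have hb' : b = (i + 1 + (t : Int)) + 1 := by push_cast at hb ⊢; omega
    subst hb'
    have hib0 : i + 1 ≤ i + 1 + (t : Int) := by omega
    rw [PySem.List.pyRange_one_succ_right hib0, List.foldl_append, List.foldl_cons, List.foldl_nil]
    obtain ⟨ih1, ih2, ih3, ih4⟩ := ih (i + 1 + (t : Int)) rfl (by omega)
    have hk : (step2 vet i ((PySem.List.pyRange (i + 1) (i + 1 + (t : Int)) 1).foldl (step2 vet i) (k₁, dp₁)) (i + 1 + (t : Int))).1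
        = k₁ + S vet i (i + 1 + (t : Int) + 1) := by
      rw [step2_fst, ih1, S_succ vet i _ hib0]; ring
    have hsnd : (step2 vet i ((PySem.List.pyRange (i + 1) (i + 1 + (t : Int)) 1).foldl (step2 vet i) (k₁, dp₁)) (i + 1 + (t : Int))).2
        = setIJ ((PySem.List.pyRange (i + 1) (i + 1 + (t : Int)) 1).foldl (step2 vet i) (k₁, dp₁)).2 i (i + 1 + (t : Int))
            (step2 vet i ((PySem.List.pyRange (i + 1) (i + 1 + (t : Int)) 1).foldl (step2 vet i) (k₁, dp₁)) (i + 1 + (t : Int))).1 := rfl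
    have hi' : i.toNat < ((PySem.List.pyRange (i + 1) (i + 1 + (t : Int)) 1).foldl (step2 vet i) (k₁, dp₁)).2.length := by
      rw [ih2]; omega
    have hj' : (i + 1 + (t : Int)).toNat < (((PySem.List.pyRange (i + 1) (i + 1 + (t : Int)) 1).foldl (step2 vet i) (k₁, dp₁)).2.getD i.toNat []).length := by
      rw [ih3, hrowi]; omega
    refine ⟨hk, ?_, ?_, ?_⟩
    · rw [hsnd, length_setIJ, ih2]
    · intro r; rw [hsnd, rowlen_setIJ, ih3]
    · intro r c hr hc
      rw [hsnd, getIJ_setIJ _ _ _ _ _ _ hi' hj']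
      by_cases hcase : r.toNat = i.toNat ∧ c.toNat = (i + 1 + (t : Int)).toNat
      · rw [if_pos hcase, if_pos (by omega), hk, show c = i + 1 + (t : Int) from by omega]
      · rw [if_neg hcase, ih4 r c hr hc]
        by_cases h2 : r = i ∧ i + 1 ≤ c ∧ c < i + 1 + (t : Int)
        · rw [if_pos h2, if_pos (by omega)]
        · rw [if_neg h2, if_neg (by omega)]

theorem dp0_zero (n : Int) (r c : Int) :
    getIJ ((PySem.List.pyRange 0 n 1).map (fun _ => (PySem.List.pyRange 0 n 1).map (fun _ => (0 : Int)))) r c = 0 := by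
  unfold getIJ
  have hz : ∀ x ∈ (((PySem.List.pyRange 0 n 1).map (fun _ => (PySem.List.pyRange 0 n 1).map (fun _ => (0 : Int)))).getD r.toNat []), x = 0 := by
    intro x hx
    cases h : ((PySem.List.pyRange 0 n 1).map (fun _ => (PySem.List.pyRange 0 n 1).map (fun _ => (0 : Int))))[r.toNat]? with
    | none => rw [List.getD_eq_getElem?_getD, h] at hx; simp at hx
    | some row =>
      rw [List.getD_eq_getElem?_getD, h] at hx
      simp only [Option.getD_some] at hx
      have hrow := List.mem_of_getElem? h
      obtain ⟨y, hy, rfl⟩ := List.mem_map.mp hrow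
      obtain ⟨z, hz, rfl⟩ := List.mem_map.mp hx
      rfl
  rw [List.getD_eq_getElem?_getD]
  cases h2 : (((PySem.List.pyRange 0 n 1).map (fun _ => (PySem.List.pyRange 0 n 1).map (fun _ => (0 : Int)))).getD r.toNat [])[c.toNat]? with
  | none => rfl
  | some x => exact hz x (List.mem_of_getElem? h2)

theorem dp0_len (n : Int) :
    ((PySem.List.pyRange 0 n 1).map (fun _ => (PySem.List.pyRange 0 n 1).map (fun _ => (0 : Int)))).length = n.toNat := by
  simp [PySem.List.length_pyRange_one]

theorem dp0_rowlen (n : Int) (r : Nat) (hr : r < n.toNat) :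
    (((PySem.List.pyRange 0 n 1).map (fun _ => (PySem.List.pyRange 0 n 1).map (fun _ => (0 : Int)))).getD r []).length = n.toNat := by
  rw [List.getD_eq_getElem?_getD, List.getElem?_map]
  have : r < (PySem.List.pyRange 0 n 1).length := by
    rw [PySem.List.length_pyRange_one]; omega
  rw [List.getElem?_eq_getElem this]
  simp [PySem.List.length_pyRange_one]

theorem outer_spec (vet : List Int) (n : Int) :
    ∀ (m : Nat) (b : Int), b = m → b ≤ n →
    ((((PySem.List.pyRange 0 b 1).foldl
        (fun dp i =>
          ((PySem.List.pyRange (i + 1) n 1).foldl (step2 vet i)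
            ((PySem.List.pyRange (i + 1) n 1).foldl (step1 vet i) (0, dp))).2)
        ((PySem.List.pyRange 0 n 1).map (fun _ => (PySem.List.pyRange 0 n 1).map (fun _ => (0 : Int))))).length = n.toNat) ∧
     (∀ r : Nat, r < n.toNat →
        (((PySem.List.pyRange 0 b 1).foldl
          (fun dp i =>
            ((PySem.List.pyRange (i + 1) n 1).foldl (step2 vet i)
              ((PySem.List.pyRange (i + 1) n 1).foldl (step1 vet i) (0, dp))).2)
          ((PySem.List.pyRange 0 n 1).map (fun _ => (PySem.List.pyRange 0 n 1).map (fun _ => (0 : Int))))).getD r []).length = n.toNat) ∧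
     (∀ r c : Int, 0 ≤ r → r < n → 0 ≤ c → c < n →
        getIJ ((PySem.List.pyRange 0 b 1).foldl
          (fun dp i =>
            ((PySem.List.pyRange (i + 1) n 1).foldl (step2 vet i)
              ((PySem.List.pyRange (i + 1) n 1).foldl (step1 vet i) (0, dp))).2)
          ((PySem.List.pyRange 0 n 1).map (fun _ => (PySem.List.pyRange 0 n 1).map (fun _ => (0 : Int))))) r c =
        if r < b then Ent vet n r c else 0)) := by
  intro m
  induction m with
  | zero =>
    intro b hb hbn
    have hb' : b = 0 := by exact_mod_cast hb
    subst hb'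
    rw [show PySem.List.pyRange 0 (0:Int) 1 = [] from PySem.List.pyRange_one_eq_nil (by omega)]
    simp only [List.foldl_nil]
    refine ⟨dp0_len n, fun r hr => dp0_rowlen n r hr, ?_⟩
    intro r c hr hrn hc hcn
    rw [if_neg (by omega), dp0_zero]
  | succ m ih =>
    intro b hb hbn
    have hb' : b = (m : Int) + 1 := by push_cast at hb ⊢; omega
    subst hb'
    have hmn : (m : Int) < n := by omega
    rw [PySem.List.pyRange_one_succ_right (by omega : (0:Int) ≤ (m:Int)), List.foldl_append, List.foldl_cons, List.foldl_nil]
    obtain ⟨ihlen, ihrow, ihent⟩ := ih (m : Int) rfl (by omega)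
    set dpP := (PySem.List.pyRange 0 (m:Int) 1).foldl
        (fun dp i =>
          ((PySem.List.pyRange (i + 1) n 1).foldl (step2 vet i)
            ((PySem.List.pyRange (i + 1) n 1).foldl (step1 vet i) (0, dp))).2)
        ((PySem.List.pyRange 0 n 1).map (fun _ => (PySem.List.pyRange 0 n 1).map (fun _ => (0 : Int)))) with hdpP
    have hmlen : (m : Int).toNat < dpP.length := by rw [ihlen]; omega
    have hmrow : (m : Int).toNat < (dpP.getD (m : Int).toNat []).length := by
      rw [ihrow (m : Int).toNat (by omega)]; omega
    rw [loop1_spec vet (m : Int) _ 0 dpP hmlen]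
    have hct : (0:Int) + (((PySem.List.pyRange ((m:Int) + 1) n 1).countP (fun j => decide (pyAt vet j < pyAt vet (m:Int)))) : Int) = cnt vet n (m:Int) := by
      unfold cnt; ring
    rw [hct]
    rcases eq_or_ne (PySem.List.pyRange ((m:Int) + 1) n 1) ([] : List Int) with hE | hE
    · have hn1 : n = (m : Int) + 1 := by
        have := congrArg List.length hE
        rw [PySem.List.length_pyRange_one] at this
        simp at this
        omega
      rw [hE]
      simp only [List.foldl_nil, if_true]
      refine ⟨ihlen, ihrow, ?_⟩
      intro r c hr hrn hc hcn
      rw [ihent r c hr hrn hc hcn]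
      have hcnt0 : cnt vet n (m : Int) = 0 := by unfold cnt; rw [hE]; simp
      by_cases hC : r < (m : Int)
      · rw [if_pos hC, if_pos (by omega)]
      · rw [if_neg hC]
        by_cases hD : r = (m : Int)
        · rw [if_pos (by omega), hD]
          unfold Ent
          by_cases hcc : c < (m : Int)
          · rw [if_pos hcc]
          · rw [if_neg hcc, if_pos (by omega), hcnt0]
        · rw [if_neg (by omega)]
    · rw [if_neg hE]
      obtain ⟨l21, l22, l23, l24⟩ := loop2_spec vet n (m : Int) (cnt vet n (m:Int))
        (setIJ dpP (m:Int) (m:Int) (cnt vet n (m:Int))) (by omega) hmn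
        (by rw [length_setIJ]; exact ihlen)
        (by rw [rowlen_setIJ]; exact ihrow (m : Int).toNat (by omega))
        ((n - ((m:Int) + 1)).toNat) n (by omega) (by omega)
      refine ⟨l22, ?_, ?_⟩
      · intro r hr
        rw [l23, rowlen_setIJ]
        exact ihrow r hr
      · intro r c hr hrn hc hcn
        rw [l24 r c hr hc]
        by_cases hA : r = (m:Int) ∧ (m:Int) + 1 ≤ c ∧ c < n
        · rw [if_pos hA, if_pos (by omega), hA.1]
          unfold Ent
          rw [if_neg (by omega), if_neg (by omega)]
        · rw [if_neg hA, getIJ_setIJ _ _ _ _ _ _ hmlen hmrow]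
          by_cases hB : r.toNat = (m:Int).toNat ∧ c.toNat = (m:Int).toNat
          · rw [if_pos hB, if_pos (by omega : r < (m:Int) + 1)]
            rw [show r = (m:Int) from by omega, show c = (m:Int) from by omega]
            unfold Ent
            rw [if_neg (by omega), if_pos rfl]
          · rw [if_neg hB, ihent r c hr hrn hc hcn]
            by_cases hC : r < (m:Int)
            · rw [if_pos hC, if_pos (by omega)]
            · rw [if_neg hC]
              by_cases hD : r = (m:Int)
              · have hcm : c < (m:Int) := by omega
                rw [if_pos (by omega : r < (m:Int) + 1), hD]
                unfold Ent
                rw [if_pos hcm]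
              · rw [if_neg (by omega)]

theorem hom_sel (s i : Int) (f : Int → Int) (L : List Int) :
    ∀ st : Int × Int × Int,
      L.foldl (pureA s i f) (s + st.1, st.2) =
        ((s + (L.foldl (pureB i f) st).1, (L.foldl (pureB i f) st).2)) := by
  induction L with
  | nil => intro st; rfl
  | cons j t ih =>
    intro st
    rw [List.foldl_cons, List.foldl_cons]
    by_cases hp : f j < st.1
    · rw [show pureA s i f (s + st.1, st.2) j = (s + (f j, i, j).1, (f j, i, j).2) from by
          unfold pureA; rw [if_pos (by dsimp; omega)],
        show pureB i f st j = (f j, i, j) from by unfold pureB; rw [if_pos hp]]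
      exact ih (f j, i, j)
    · rw [show pureA s i f (s + st.1, st.2) j = (s + st.1, st.2) from by
          unfold pureA; rw [if_neg (by dsimp; omega)],
        show pureB i f st j = st from by unfold pureB; rw [if_neg hp]]
      exact ih st

theorem mono_sel (i : Int) (f : Int → Int) (L : List Int) :
    ∀ st : Int × Int × Int, (L.foldl (pureB i f) st).1 ≤ st.1 := by
  induction L with
  | nil => intro st; exact le_refl _
  | cons j t ih =>
    intro st
    rw [List.foldl_cons]
    unfold pureB
    by_cases hp : f j < st.1
    · rw [if_pos hp]
      exact le_trans (ih _) (by dsimp; omega)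
    · rw [if_neg hp]
      exact ih st

theorem loopB_spec (vet : List Int) (i : Int) (st : Int × Int × Int) :
    ∀ (t : Nat) (b : Int), b = i + 1 + t →
    (PySem.List.pyRange (i + 1) b 1).foldl (stepB vet i) (0, st) =
      (S vet i b, (PySem.List.pyRange (i + 1) b 1).foldl (pureB i (fun j => S vet i (j + 1))) st) := by
  intro t
  induction t with
  | zero =>
    intro b hb
    have hb' : b = i + 1 := by push_cast at hb; omega
    subst hb'
    rw [PySem.List.pyRange_one_eq_nil (by omega : i + 1 ≤ i + 1)]
    simp [S_self]
  | succ t ih =>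
    intro b hb
    have hb' : b = (i + 1 + (t : Int)) + 1 := by push_cast at hb ⊢; omega
    subst hb'
    have hib0 : i + 1 ≤ i + 1 + (t : Int) := by omega
    rw [PySem.List.pyRange_one_succ_right hib0, List.foldl_append, List.foldl_append,
        List.foldl_cons, List.foldl_cons, List.foldl_nil, List.foldl_nil,
        ih (i + 1 + (t : Int)) rfl]
    unfold stepB pureB
    dsimp only
    simp only [S_succ vet i _ hib0]
    unfold sgn
    split_ifs <;> simp_all <;> omega

theorem Ent_diag (vet : List Int) (n i : Int) : Ent vet n i i = cnt vet n i := by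
  unfold Ent; simp

theorem Ent_gt (vet : List Int) (n i j : Int) (h : i < j) :
    Ent vet n i j = cnt vet n i + S vet i (j + 1) := by
  unfold Ent; rw [if_neg (by omega), if_neg (by omega)]

theorem sel_main (vet : List Int) (n s : Int) (dpF : List (List Int))
    (hent : ∀ r c : Int, 0 ≤ r → r < n → 0 ≤ c → c < n → getIJ dpF r c = Ent vet n r c) :
    ∀ (L : List Int), (∀ i ∈ L, 0 ≤ i ∧ i < n) →
    ∀ st : Int × Int × Int, st.1 ≤ 0 →
      (L.foldl (fun st i => (PySem.List.pyRange i n 1).foldl (stepA dpF s i) st) (s + st.1, st.2)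
        = (s + (L.foldl (fun st i => ((PySem.List.pyRange (i + 1) n 1).foldl (stepB vet i) (0, st)).2) st).1,
           (L.foldl (fun st i => ((PySem.List.pyRange (i + 1) n 1).foldl (stepB vet i) (0, st)).2) st).2))
      ∧ (L.foldl (fun st i => ((PySem.List.pyRange (i + 1) n 1).foldl (stepB vet i) (0, st)).2) st).1 ≤ 0 := by
  intro L
  induction L with
  | nil => intro _ st h; exact ⟨rfl, h⟩
  | cons i t ihL =>
    intro hmem st hst
    have h0i : 0 ≤ i := (hmem i (by simp)).1
    have hin : i < n := (hmem i (by simp)).2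
    have hmem' : ∀ j ∈ t, 0 ≤ j ∧ j < n := fun j hj => hmem j (by simp [hj])
    rw [List.foldl_cons, List.foldl_cons]
    have hB := loopB_spec vet i st ((n - (i + 1)).toNat) n (by omega)
    rw [hB]
    rw [PySem.List.pyRange_one_cons hin, List.foldl_cons]
    have hAi : stepA dpF s i (s + st.1, st.2) i = (s + st.1, st.2) := by
      unfold stepA
      rw [hent i i h0i hin h0i hin, Ent_diag]
      rw [if_neg (by dsimp; omega)]
    rw [hAi]
    have hcong : (PySem.List.pyRange (i + 1) n 1).foldl (stepA dpF s i) (s + st.1, st.2)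
        = (PySem.List.pyRange (i + 1) n 1).foldl (pureA s i (fun j => S vet i (j + 1))) (s + st.1, st.2) := by
      refine PySem.List.foldl_congr_mem _ _ _ _ ?_
      intro acc j hj
      have hj' := (PySem.List.mem_pyRange_one).mp hj
      unfold stepA pureA
      rw [hent i i h0i hin h0i hin, hent i j h0i hin (by omega) (by omega),
          Ent_diag, Ent_gt vet n i j (by omega)]
      have harith : s - cnt vet n i + (cnt vet n i + S vet i (j + 1)) = s + S vet i (j + 1) := by ring
      rw [harith]
    rw [hcong, hom_sel s i (fun j => S vet i (j + 1)) (PySem.List.pyRange (i + 1) n 1) st]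
    have hmono := mono_sel i (fun j => S vet i (j + 1)) (PySem.List.pyRange (i + 1) n 1) st
    exact ihL hmem' _ (le_trans hmono hst)

-- ===== VERDICT (by name: the statement is the Claim_ definition above) =====
theorem solve_spec : Claim_equal_solve := by
  unfold Claim_equal_solve
  intro n vet _ _
  unfold Spec_solve
  by_cases hn : n ≤ 0
  · simp [solve, solve_alt, PySem.List.pyRange_one_eq_nil hn]
  · have hn' : (0:Int) < n := by omega
    simp only [solve, solve_alt]
    obtain ⟨flen, frow, fent⟩ := outer_spec vet n n.toNat n (by omega) (le_refl n)
    have hent : ∀ r c : Int, 0 ≤ r → r < n → 0 ≤ c → c < n →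
        getIJ ((PySem.List.pyRange 0 n 1).foldl
          (fun dp i =>
            ((PySem.List.pyRange (i + 1) n 1).foldl (step2 vet i)
              ((PySem.List.pyRange (i + 1) n 1).foldl (step1 vet i) (0, dp))).2)
          ((PySem.List.pyRange 0 n 1).map (fun _ => (PySem.List.pyRange 0 n 1).map (fun _ => (0 : Int))))) r c
          = Ent vet n r c := by
      intro r c h1 h2 h3 h4
      have := fent r c h1 h2 h3 h4
      rw [this, if_pos (by omega)]
    have hmem : ∀ i ∈ PySem.List.pyRange 0 n 1, 0 ≤ i ∧ i < n := by
      intro i hi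
      have := (PySem.List.mem_pyRange_one).mp hi
      omega
    have hmain := sel_main vet n
      ((PySem.List.pyRange 0 n 1).foldl
        (fun s i => s + getIJ ((PySem.List.pyRange 0 n 1).foldl
          (fun dp i =>
            ((PySem.List.pyRange (i + 1) n 1).foldl (step2 vet i)
              ((PySem.List.pyRange (i + 1) n 1).foldl (step1 vet i) (0, dp))).2)
          ((PySem.List.pyRange 0 n 1).map (fun _ => (PySem.List.pyRange 0 n 1).map (fun _ => (0 : Int))))) i i) 0)
      ((PySem.List.pyRange 0 n 1).foldl
          (fun dp i =>
            ((PySem.List.pyRange (i + 1) n 1).foldl (step2 vet i)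
              ((PySem.List.pyRange (i + 1) n 1).foldl (step1 vet i) (0, dp))).2)
          ((PySem.List.pyRange 0 n 1).map (fun _ => (PySem.List.pyRange 0 n 1).map (fun _ => (0 : Int)))))
      hent (PySem.List.pyRange 0 n 1) hmem ((0 : Int), (0 : Int), (0 : Int)) (le_refl 0)
    obtain ⟨heq, _⟩ := hmain
    dsimp only at heq
    rw [add_zero] at heq
    rw [heq]
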